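-- pv_equiv track=rewrite | github.com/evg-goncharenko/msu-prac | 5th_semester/ml/hw_10_21/functions.py | prod_non_zero_diag
-- ===== SOURCE A (Python) =====
-- from typing import List
--
-- def prod_non_zero_diag(X: List[List[int]]) -> int:
--     """
--     Compute product of nonzero elements from matrix diagonal,
--     return -1 if there is no such elements.
--
--     Return type: int
--     """
--     res = 1
--     fl = -1
--
--     for i in range(0, min(len(X), len(X[0]))):
--         if X[i][i]:
--             fl = 1
--             res *= X[i][i]
--
--     if fl == -1:
--         return fl
--     return res
-- ===== SOURCE B (Python) =====
-- from typing import List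
--
-- def prod_non_zero_diag(X: List[List[int]]) -> int:
--     """
--     Compute product of nonzero elements from matrix diagonal,
--     return -1 if there is no such elements.
--
--     Recursive matrix-peeling: strip the first row and first column and recurse
--     on the submatrix, combining the top-left entry with the submatrix's optional
--     product; None means "no nonzero diagonal entry seen".
--     """
--     def go(rows, n):
--         if n == 0:
--             return None
--         rest = go([r[1:] for r in rows[1:]], n - 1)
--         h = rows[0][0]
--         if h == 0:
--             return rest
--         return h if rest is None else h * rest
--
--     p = go(X, min(len(X), len(X[0])))
--     return -1 if p is None else p
-- ===== Notes on version B (the rewrite author's own statement) =====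
-- stated objective: alternative
-- what changed: Replaces A's index loop with found-flag and running accumulator by a recursive matrix-peeling algorithm: strip the first row and first column, recurse on the submatrix, and combine the top-left entry with the submatrix's optional product (None = no nonzero entry seen).
import Mathlib
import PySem

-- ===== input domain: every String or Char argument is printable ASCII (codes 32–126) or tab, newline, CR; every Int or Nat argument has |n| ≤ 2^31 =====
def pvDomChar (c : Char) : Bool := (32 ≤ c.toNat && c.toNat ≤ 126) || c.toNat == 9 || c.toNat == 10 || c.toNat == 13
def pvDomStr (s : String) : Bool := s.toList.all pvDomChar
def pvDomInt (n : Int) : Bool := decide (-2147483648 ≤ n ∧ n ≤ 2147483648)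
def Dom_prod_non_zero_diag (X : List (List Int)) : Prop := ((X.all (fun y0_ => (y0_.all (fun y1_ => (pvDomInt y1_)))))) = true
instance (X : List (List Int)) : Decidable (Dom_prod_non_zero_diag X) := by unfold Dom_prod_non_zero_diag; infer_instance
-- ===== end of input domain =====

-- B replaces A's index loop with found-flag and accumulator by a recursive matrix-peeling
-- algorithm (strip first row and column, recurse, combine with an Option product); same
-- return values on Pre_ (objective: alternative).

-- ===== PORT A =====
-- subscript X[i][i]; default 0 never used inside Pre_ (indices in range there)
def pvDiagAt (X : List (List Int)) (i : Int) : Int :=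
  (PySem.List.pyGet? ((PySem.List.pyGet? X i).getD []) i).getD 0

def prod_non_zero_diag (X : List (List Int)) : Int :=
  let n : Int := min (X.length : Int) ((((PySem.List.pyGet? X 0).getD []).length : Int))
  let rf : Int × Int :=
    (PySem.List.pyRange 0 n 1).foldl
      (fun (p : Int × Int) i =>
        if pvDiagAt X i ≠ 0 then (p.1 * pvDiagAt X i, 1) else p)
      (1, -1)
  if rf.2 = -1 then rf.2 else rf.1

-- ===== PORT B =====
-- go(rows, n): rows[1:] with every row's r[1:] (= drop 1, exact for the nonneg bound 1)
def pvGo : List (List Int) → Nat → Option Int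
  | _, 0 => none
  | rows, Nat.succ m =>
    let rest := pvGo ((rows.drop 1).map (fun r => r.drop 1)) m
    let h := pvDiagAt rows 0
    if h = 0 then rest
    else match rest with
      | none => some h
      | some p => some (h * p)

def prod_non_zero_diag_alt (X : List (List Int)) : Int :=
  let n : Int := min (X.length : Int) ((((PySem.List.pyGet? X 0).getD []).length : Int))
  match pvGo X n.toNat with
  | none => -1
  | some p => p

-- ===== PRECONDITION & SPEC =====
-- Pre_ excludes exactly the inputs where Python A raises IndexError: the empty matrix
-- (X[0]) and matrices where some row i < min(len(X), len(X[0])) is too short for X[i][i].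
def Pre_prod_non_zero_diag (X : List (List Int)) : Prop :=
  X ≠ [] ∧ ∀ i < min X.length ((X.headD []).length), i < (X.getD i []).length
instance (X : List (List Int)) : Decidable (Pre_prod_non_zero_diag X) := by
  unfold Pre_prod_non_zero_diag; infer_instance
def pvWitness_prod_non_zero_diag : List (List Int) := [[2, 0], [0, 3]]

def Spec_prod_non_zero_diag (X : List (List Int)) (out : Int) : Prop := out = prod_non_zero_diag_alt X
instance (X : List (List Int)) (out : Int) : Decidable (Spec_prod_non_zero_diag X out) := by unfold Spec_prod_non_zero_diag; infer_instance

-- ===== CLAIM (what is proved, stated in full; the proofs are below) =====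
def Claim_equal_prod_non_zero_diag : Prop := ∀ (X : List (List Int)), Dom_prod_non_zero_diag X → Pre_prod_non_zero_diag X → Spec_prod_non_zero_diag X (prod_non_zero_diag X)

-- ===== LEMMAS AND PROOFS =====

-- A's loop over any index list l, from any state (r, f):
-- result is (fold of the nonzero values onto r, f unchanged iff no nonzero value).
theorem pv_fold_char (X : List (List Int)) (l : List Int) (r f : Int) :
    l.foldl (fun (p : Int × Int) i =>
        if pvDiagAt X i ≠ 0 then (p.1 * pvDiagAt X i, 1) else p) (r, f)
      = (((l.map (fun i => pvDiagAt X i)).filter (fun v => v ≠ 0)).foldl (· * ·) r,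
         if ((l.map (fun i => pvDiagAt X i)).filter (fun v => v ≠ 0)) = [] then f else 1) := by
  induction l generalizing r f with
  | nil => simp
  | cons a t ih =>
    simp only [List.foldl_cons, List.map_cons, List.filter_cons]
    by_cases h : pvDiagAt X a ≠ 0
    · rw [if_pos h, ih]; simp [h]
    · rw [if_neg h, ih]; rw [not_not] at h; simp [h]

theorem pv_foldl_mul (l : List Int) (r : Int) :
    l.foldl (· * ·) r = r * l.foldr (· * ·) 1 := by
  induction l generalizing r with
  | nil => simp
  | cons a t ih => simp [ih (r * a), mul_assoc]

-- diagonal of the peeled matrix = shifted diagonal of the matrix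
theorem pv_diag_peel (rows : List (List Int)) (k : Nat) :
    pvDiagAt ((rows.drop 1).map (fun r => r.drop 1)) (k : Int)
      = pvDiagAt rows ((k + 1 : Nat) : Int) := by
  simp only [pvDiagAt, PySem.List.pyGet?_natCast, List.getElem?_map, List.getElem?_drop,
    Nat.add_comm 1 k]
  cases rows[k + 1]? with
  | none => simp
  | some row => simp

-- characterisation of B's recursion via the nonzero entries of the first m diagonal slots
theorem pv_go_char (m : Nat) (rows : List (List Int)) :
    pvGo rows m
      = (if (((List.range m).map (fun k : Nat => pvDiagAt rows (k : Int))).filter (fun v => v ≠ 0)) = []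
         then none
         else some ((((List.range m).map (fun k : Nat => pvDiagAt rows (k : Int))).filter (fun v => v ≠ 0)).foldr (· * ·) 1)) := by
  induction m generalizing rows with
  | zero => simp [pvGo]
  | succ m ih =>
    rw [List.range_succ_eq_map]
    simp only [List.map_cons, List.map_map, List.filter_cons, Nat.cast_zero]
    have hmap : ((List.range m).map ((fun k : Nat => pvDiagAt rows (k : Int)) ∘ Nat.succ))
        = (List.range m).map (fun k : Nat => pvDiagAt ((rows.drop 1).map (fun r => r.drop 1)) (k : Int)) := by
      apply List.map_congr_left
      intro k _
      simp only [Function.comp_def, Nat.succ_eq_add_one]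
      exact (pv_diag_peel rows k).symm
    rw [hmap]
    show (let rest := pvGo ((rows.drop 1).map (fun r => r.drop 1)) m
          let h := pvDiagAt rows 0
          if h = 0 then rest
          else match rest with
            | none => some h
            | some p => some (h * p)) = _
    rw [ih]
    by_cases h0 : pvDiagAt rows 0 = 0
    · simp [h0, -List.filter_eq_nil_iff]
    · by_cases ht : (((List.range m).map (fun k : Nat => pvDiagAt ((rows.drop 1).map (fun r => r.drop 1)) (k : Int))).filter (fun v => v ≠ 0)) = []
      · simp only [ne_eq, decide_not, List.drop_one, List.map_tail] at ht
        simp [h0, ht, -List.filter_eq_nil_iff]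
      · simp only [ne_eq, decide_not, List.drop_one, List.map_tail] at ht
        simp [h0, ht, -List.filter_eq_nil_iff]

theorem pv_witness_ok :
    Dom_prod_non_zero_diag pvWitness_prod_non_zero_diag ∧
    Pre_prod_non_zero_diag pvWitness_prod_non_zero_diag := by decide

-- ===== VERDICT (by name: the statement is the Claim_ definition above) =====
theorem prod_non_zero_diag_spec : Claim_equal_prod_non_zero_diag := by
  intro X _ _
  unfold Spec_prod_non_zero_diag prod_non_zero_diag prod_non_zero_diag_alt
  simp only []
  set n : Int := min (X.length : Int) ((((PySem.List.pyGet? X 0).getD []).length : Int)) with hn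
  have hl : (PySem.List.pyRange 0 n 1).map (fun i => pvDiagAt X i)
      = (List.range n.toNat).map (fun k : Nat => pvDiagAt X (k : Int)) := by
    rw [PySem.List.pyRange_one, List.map_map]
    simp only [Function.comp_def, zero_add, sub_zero]
  rw [pv_fold_char, pv_go_char, hl]
  by_cases h : ((List.range n.toNat).map (fun k : Nat => pvDiagAt X (k : Int))).filter (fun v => v ≠ 0) = []
  · simp only [ne_eq, decide_not] at h
    simp [h, -List.filter_eq_nil_iff]
  · simp only [ne_eq, decide_not] at h
    simp [h, pv_foldl_mul, -List.filter_eq_nil_iff]
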